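-- pv_equiv track=rewrite | github.com/jds8/SAE4DLM-CE | dlm_order/dream_infer.py | find_first_stop
-- ===== SOURCE A (Python) =====
-- from typing import Any, Dict, List, Optional, Tuple
--
-- def find_first_stop(gen_ids: List[int], stop_seqs: List[List[int]]) -> Optional[Tuple[int, int]]:
--     """
--     Return (index, length) of earliest stop sequence match in gen_ids.
--     """
--     best: Optional[Tuple[int, int]] = None
--     n = len(gen_ids)
--     for i in range(n):
--         for seq in stop_seqs:
--             m = len(seq)
--             if m == 0 or i + m > n:
--                 continue
--             if gen_ids[i: i + m] == seq:
--                 if best is None or i < best[0]: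
--                     best = (i, m)
--         if best is not None and best[0] == i:
--             return best
--     return best
-- ===== SOURCE B (Python) =====
-- from typing import List, Optional, Tuple
--
-- def find_first_stop(gen_ids: List[int], stop_seqs: List[List[int]]) -> Optional[Tuple[int, int]]:
--     """
--     Pattern-major search: for each stop sequence, scan only positions strictly
--     before the best index found so far; earlier sequences win index ties.
--     """
--     best: Optional[Tuple[int, int]] = None
--     n = len(gen_ids)
--     for seq in stop_seqs:
--         m = len(seq)
--         if m == 0:
--             continue
--         limit = n - m + 1 if best is None else min(n - m + 1, best[0])
--         for j in range(limit):
--             if gen_ids[j:j + m] == seq: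
--                 best = (j, m)
--                 break
--     return best
-- ===== Notes on version B (the rewrite author's own statement) =====
-- stated objective: alternative
-- what changed: Replaced A's position-major scan (every index against every stop sequence, restarting the comparison at each index) with a pattern-major search: each stop sequence is scanned once for its first occurrence, and only positions strictly before the current best index are examined, so the search window shrinks as matches are found; index ties keep the earlier sequence.
import Mathlib
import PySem

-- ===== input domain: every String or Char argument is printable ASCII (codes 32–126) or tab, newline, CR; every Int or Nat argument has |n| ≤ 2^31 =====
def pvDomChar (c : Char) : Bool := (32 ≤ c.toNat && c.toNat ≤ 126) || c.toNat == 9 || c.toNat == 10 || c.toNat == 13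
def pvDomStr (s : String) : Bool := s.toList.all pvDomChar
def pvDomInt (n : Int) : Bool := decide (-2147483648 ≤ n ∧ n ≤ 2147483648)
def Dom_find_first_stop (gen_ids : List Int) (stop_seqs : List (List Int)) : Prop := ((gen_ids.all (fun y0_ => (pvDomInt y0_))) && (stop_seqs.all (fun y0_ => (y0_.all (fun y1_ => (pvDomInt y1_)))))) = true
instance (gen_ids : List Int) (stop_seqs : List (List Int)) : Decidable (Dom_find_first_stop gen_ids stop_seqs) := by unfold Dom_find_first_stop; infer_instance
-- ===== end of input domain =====

-- B replaces A's position-major scan with a pattern-major search (each stop sequence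
-- scanned once, window pruned to the current best index); same results, alternative structure.

-- ===== PORT A =====
-- inner 'for seq in stop_seqs' loop of A
def pvAInner (gen_ids : List Int) (n i : Int) (b : Option (Int × Int)) (seqs : List (List Int)) : Option (Int × Int) :=
  seqs.foldl (fun b seq =>
    let m : Int := seq.length
    if m = 0 ∨ i + m > n then b
    else if PySem.List.slice gen_ids (some i) (some (i + m)) = seq then
      (match b with
       | none => some (i, m)
       | some p => if i < p.1 then some (i, m) else b)
    else b) b

-- outer 'for i in range(n)' loop of A, with its early return
def pvAOuter (gen_ids : List Int) (stop_seqs : List (List Int)) (n : Int) : List Int → Option (Int × Int) → Option (Int × Int)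
  | [], best => best
  | i :: rest, best =>
    let best' := pvAInner gen_ids n i best stop_seqs
    match best' with
    | some p => if p.1 = i then some p else pvAOuter gen_ids stop_seqs n rest best'
    | none => pvAOuter gen_ids stop_seqs n rest best'

def find_first_stop (gen_ids : List Int) (stop_seqs : List (List Int)) : Option (Int × Int) :=
  let n : Int := gen_ids.length
  pvAOuter gen_ids stop_seqs n (PySem.List.pyRange 0 n 1) none

-- ===== PORT B =====
-- B's inner 'for j in range(limit): … break' loop
def pvBScan (gen_ids seq : List Int) (m : Int) : List Int → Option Int
  | [] => none
  | j :: rest =>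
    if PySem.List.slice gen_ids (some j) (some (j + m)) = seq then some j
    else pvBScan gen_ids seq m rest

def find_first_stop_alt (gen_ids : List Int) (stop_seqs : List (List Int)) : Option (Int × Int) :=
  let n : Int := gen_ids.length
  stop_seqs.foldl (fun best seq =>
    let m : Int := seq.length
    if m = 0 then best
    else
      let limit : Int := match best with
        | none => n - m + 1
        | some p => min (n - m + 1) p.1
      match pvBScan gen_ids seq m (PySem.List.pyRange 0 limit 1) with
      | some j => some (j, m)
      | none => best) none

-- ===== PRECONDITION & SPEC =====
def Spec_find_first_stop (gen_ids : List Int) (stop_seqs : List (List Int)) (out : Option (Int × Int)) : Prop := out = find_first_stop_alt gen_ids stop_seqs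
instance (gen_ids : List Int) (stop_seqs : List (List Int)) (out : Option (Int × Int)) : Decidable (Spec_find_first_stop gen_ids stop_seqs out) := by unfold Spec_find_first_stop; infer_instance

-- ===== CLAIM (what is proved, stated in full; the proofs are below) =====
def Claim_equal_find_first_stop : Prop := ∀ (gen_ids : List Int) (stop_seqs : List (List Int)), Dom_find_first_stop gen_ids stop_seqs → Spec_find_first_stop gen_ids stop_seqs (find_first_stop gen_ids stop_seqs)

-- ===== LEMMAS AND PROOFS =====

-- 'seq matches gen at Nat position i'
def pvMatch (gen : List Int) (i : Nat) (s : List Int) : Bool :=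
  decide (s ≠ []) && decide ((gen.drop i).take s.length = s)

-- least j < n with p j (computed from the top; characterised by the iffs below)
def pvFirst (p : Nat → Bool) : Nat → Option Nat
  | 0 => none
  | n + 1 =>
    match pvFirst p n with
    | some j => some j
    | none => if p n then some n else none

-- common specification: earliest index with a match, tie broken by sequence order
def pvSpec (gen : List Int) (seqs : List (List Int)) : Option (Int × Int) :=
  match pvFirst (fun i => seqs.any (pvMatch gen i)) gen.length with
  | some i =>
    match seqs.find? (pvMatch gen i) with
    | some s => some ((i : Int), (s.length : Int))
    | none => none
  | none => none

theorem pvFirst_none_iff (p : Nat → Bool) (n : Nat) :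
    pvFirst p n = none ↔ ∀ j < n, p j = false := by
  induction n with
  | zero => simp [pvFirst]
  | succ n ih =>
    unfold pvFirst
    rcases h : pvFirst p n with _ | j
    · have hall := ih.mp h
      by_cases hp : p n = true
      · simp only [hp, if_true]
        constructor
        · intro hc; cases hc
        · intro hall2; exact absurd (hall2 n (by omega)) (by simp [hp])
      · have hp' : p n = false := by
          cases hpp : p n
          · rfl
          · exact absurd hpp hp
        simp only [hp', Bool.false_eq_true, if_false]
        constructor
        · intro _ j hj
          rcases Nat.lt_succ_iff_lt_or_eq.mp hj with h' | h'
          · exact hall j h'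
          · subst h'; exact hp'
        · intro _; trivial
    · constructor
      · intro hc; cases hc
      · intro hall2
        have := ih.mpr (fun j hj => hall2 j (by omega))
        rw [this] at h; cases h

theorem pvFirst_some_iff (p : Nat → Bool) (n : Nat) : ∀ j,
    pvFirst p n = some j ↔ j < n ∧ p j = true ∧ ∀ k < j, p k = false := by
  induction n with
  | zero => intro j; simp [pvFirst]
  | succ n ih =>
    intro j
    unfold pvFirst
    rcases h : pvFirst p n with _ | j'
    · have hall := (pvFirst_none_iff p n).mp h
      by_cases hp : p n = true
      · simp only [hp, if_true, Option.some.injEq]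
        constructor
        · rintro rfl; exact ⟨by omega, hp, hall⟩
        · rintro ⟨hlt, hpj, hmin⟩
          have hjn : ¬ j < n := fun h' => absurd (hall j h') (by simp [hpj])
          omega
      · have hp' : p n = false := by
          cases hpp : p n
          · rfl
          · exact absurd hpp hp
        simp only [hp', Bool.false_eq_true, if_false]
        constructor
        · intro hc; cases hc
        · rintro ⟨hlt, hpj, hmin⟩
          exfalso
          have hjn : ¬ j < n := fun h' => absurd (hall j h') (by simp [hpj])
          have : j = n := by omega
          subst this
          exact absurd hpj (by simp [hp'])
    · have hc := (ih j').mp h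
      simp only [Option.some.injEq]
      constructor
      · rintro rfl; exact ⟨by omega, hc.2.1, hc.2.2⟩
      · rintro ⟨hlt, hpj, hmin⟩
        rcases Nat.lt_trichotomy j' j with h1 | h1 | h1
        · exact absurd hc.2.1 (by simp [hmin j' h1])
        · exact h1
        · exact absurd hpj (by simp [hc.2.2 j h1])

theorem pvFirst_congr (p q : Nat → Bool) (n : Nat) (h : ∀ j < n, p j = q j) :
    pvFirst p n = pvFirst q n := by
  induction n with
  | zero => rfl
  | succ n ih =>
    unfold pvFirst
    rw [ih (fun j hj => h j (by omega)), h n (by omega)]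

-- a match fits inside gen
theorem pvMatch_bound {gen : List Int} {i : Nat} {s : List Int}
    (h : pvMatch gen i s = true) : i + s.length ≤ gen.length ∧ s ≠ [] := by
  unfold pvMatch at h
  simp only [Bool.and_eq_true, decide_eq_true_eq] at h
  obtain ⟨hne, heq⟩ := h
  refine ⟨?_, hne⟩
  have hlen := congrArg List.length heq
  simp [List.length_take, List.length_drop] at hlen
  have hs : 0 < s.length := by
    cases s
    · exact absurd rfl hne
    · simp
  omega

-- slice ↔ pvMatch, for nonnegative Int index and nonempty seq
theorem pvSlice_iff_match (gen s : List Int) (j : Int) (hj : 0 ≤ j) (hs : s ≠ []) :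
    (PySem.List.slice gen (some j) (some (j + (s.length : Int))) = s) ↔ pvMatch gen j.toNat s = true := by
  obtain ⟨k, rfl⟩ : ∃ k : Nat, j = (k : Int) := ⟨j.toNat, by omega⟩
  rw [PySem.List.slice_natCast_add]
  unfold pvMatch
  simp [hs]

-- ---- A-side ----

theorem pvAInner_keep (gen : List Int) (n i m : Int) (seqs : List (List Int)) :
    pvAInner gen n i (some (i, m)) seqs = some (i, m) := by
  induction seqs with
  | nil => rfl
  | cons s rest ih =>
    unfold pvAInner
    simp only [List.foldl_cons]
    by_cases h1 : (s.length : Int) = 0 ∨ i + (s.length : Int) > n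
    · simp only [if_pos h1]
      exact ih
    · simp only [if_neg h1]
      by_cases h2 : PySem.List.slice gen (some i) (some (i + (s.length : Int))) = s
      · simp only [if_pos h2, lt_self_iff_false, if_false]
        exact ih
      · simp only [if_neg h2]
        exact ih

theorem pvAInner_none (gen : List Int) (seqs : List (List Int)) (i : Nat) (hi : i < gen.length) :
    pvAInner gen (gen.length : Int) (i : Int) none seqs =
      (match seqs.find? (pvMatch gen i) with
       | some s => some ((i : Int), (s.length : Int))
       | none => none) := by
  induction seqs with
  | nil => rfl
  | cons s rest ih =>
    unfold pvAInner
    simp only [List.foldl_cons]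
    by_cases hse : s = []
    · subst hse
      have : pvMatch gen i ([] : List Int) = false := by simp [pvMatch]
      simp only [List.find?_cons, this]
      simpa [pvAInner] using ih
    · by_cases hover : (i : Int) + (s.length : Int) > (gen.length : Int)
      · have hm : pvMatch gen i s = false := by
          cases hmm : pvMatch gen i s
          · rfl
          · exfalso
            have hb := (pvMatch_bound hmm).1
            omega
        simp only [List.find?_cons, hm]
        have hguard : ((s.length : Int) = 0 ∨ (i : Int) + (s.length : Int) > (gen.length : Int)) := Or.inr hover
        simp only [if_pos hguard]
        simpa [pvAInner] using ih
      · have hguard : ¬((s.length : Int) = 0 ∨ (i : Int) + (s.length : Int) > (gen.length : Int)) := by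
          rintro (h | h)
          · exact hse (by simpa using h)
          · omega
        simp only [if_neg hguard]
        by_cases hsl : PySem.List.slice gen (some (i : Int)) (some ((i : Int) + (s.length : Int))) = s
        · have hm : pvMatch gen i s = true := by
            have := (pvSlice_iff_match gen s (i : Int) (by positivity) hse).mp hsl
            simpa using this
          simp only [List.find?_cons, hm, if_pos hsl]
          simpa [pvAInner] using pvAInner_keep gen (gen.length : Int) (i : Int) (s.length : Int) rest
        · have hm : pvMatch gen i s = false := by
            cases hmm : pvMatch gen i s
            · rfl
            · exact absurd ((pvSlice_iff_match gen s (i : Int) (by positivity) hse).mpr (by simpa using hmm)) hsl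
          simp only [List.find?_cons, hm, if_neg hsl]
          simpa [pvAInner] using ih

theorem pvAOuter_spec (gen : List Int) (seqs : List (List Int)) :
    ∀ d k, gen.length - k = d →
      (∀ i < k, seqs.any (pvMatch gen i) = false) →
      pvAOuter gen seqs (gen.length : Int) (PySem.List.pyRange (k : Int) (gen.length : Int) 1) none = pvSpec gen seqs := by
  intro d
  induction d with
  | zero =>
    intro k hd hk
    have hge : gen.length ≤ k := by omega
    rw [PySem.List.pyRange_one_eq_nil (by exact_mod_cast hge)]
    have : pvFirst (fun i => seqs.any (pvMatch gen i)) gen.length = none :=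
      (pvFirst_none_iff _ _).mpr (fun j hj => hk j (by omega))
    simp [pvAOuter, pvSpec, this]
  | succ d ih =>
    intro k hd hk
    have hlt : k < gen.length := by omega
    rw [PySem.List.pyRange_one_cons (by exact_mod_cast hlt)]
    show pvAOuter gen seqs _ (_ :: _) none = _
    unfold pvAOuter
    rw [pvAInner_none gen seqs k hlt]
    rcases hf : seqs.find? (pvMatch gen k) with _ | s
    · -- no match at k
      have hnone : seqs.any (pvMatch gen k) = false := by
        rw [List.any_eq_false]
        intro x hx
        simpa using List.find?_eq_none.mp hf x hx
      have hk' : ∀ i < k + 1, seqs.any (pvMatch gen i) = false := by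
        intro i hi
        rcases Nat.lt_succ_iff_lt_or_eq.mp hi with h' | h'
        · exact hk i h'
        · subst h'; exact hnone
      have : ((k : Int) + 1) = ((k + 1 : Nat) : Int) := by push_cast; ring
      rw [this]
      exact ih (k + 1) (by omega) hk'
    · -- first match at k: A returns here
      have hm : pvMatch gen k s = true := List.find?_some hf
      have hany : seqs.any (pvMatch gen k) = true := by
        rw [List.any_eq_true]
        exact ⟨s, List.mem_of_find?_eq_some hf, hm⟩
      have hfirst : pvFirst (fun i => seqs.any (pvMatch gen i)) gen.length = some k :=
        (pvFirst_some_iff _ _ k).mpr ⟨hlt, hany, fun j hj => hk j hj⟩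
      simp [pvSpec, hfirst, hf]

theorem findA_eq_spec (gen : List Int) (seqs : List (List Int)) :
    find_first_stop gen seqs = pvSpec gen seqs := by
  unfold find_first_stop
  have h := pvAOuter_spec gen seqs gen.length 0 (by omega) (by intro i hi; omega)
  simpa using h

-- ---- B-side ----

theorem pvBScan_none_iff (gen s : List Int) (m : Int) :
    ∀ d a L, (L - a).toNat = d →
      (pvBScan gen s m (PySem.List.pyRange a L 1) = none ↔
        ∀ j, a ≤ j → j < L → PySem.List.slice gen (some j) (some (j + m)) ≠ s) := by
  intro d
  induction d with
  | zero =>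
    intro a L hd
    have : L ≤ a := by omega
    rw [PySem.List.pyRange_one_eq_nil this]
    simp [pvBScan]
    intro j h1 h2
    omega
  | succ d ih =>
    intro a L hd
    have hlt : a < L := by omega
    rw [PySem.List.pyRange_one_cons hlt]
    unfold pvBScan
    by_cases hsl : PySem.List.slice gen (some a) (some (a + m)) = s
    · simp only [if_pos hsl]
      constructor
      · intro h; exact absurd h (by simp)
      · intro hall
        exact absurd hsl (hall a le_rfl hlt)
    · simp only [if_neg hsl]
      rw [ih (a + 1) L (by omega)]
      constructor
      · intro hall j h1 h2
        rcases eq_or_lt_of_le h1 with h' | h'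
        · subst h'; exact hsl
        · exact hall j (by omega) h2
      · intro hall j h1 h2
        exact hall j (by omega) h2

theorem pvBScan_some_iff (gen s : List Int) (m : Int) :
    ∀ d a L j, (L - a).toNat = d →
      (pvBScan gen s m (PySem.List.pyRange a L 1) = some j ↔
        a ≤ j ∧ j < L ∧ PySem.List.slice gen (some j) (some (j + m)) = s ∧
        ∀ k, a ≤ k → k < j → PySem.List.slice gen (some k) (some (k + m)) ≠ s) := by
  intro d
  induction d with
  | zero =>
    intro a L j hd
    have : L ≤ a := by omega
    rw [PySem.List.pyRange_one_eq_nil this]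
    simp [pvBScan]
    intro h1 h2
    omega
  | succ d ih =>
    intro a L j hd
    have hlt : a < L := by omega
    rw [PySem.List.pyRange_one_cons hlt]
    unfold pvBScan
    by_cases hsl : PySem.List.slice gen (some a) (some (a + m)) = s
    · simp only [if_pos hsl, Option.some.injEq]
      constructor
      · rintro rfl
        exact ⟨le_rfl, hlt, hsl, fun k h1 h2 => by omega⟩
      · rintro ⟨h1, h2, h3, h4⟩
        by_contra hne
        have : a < j := lt_of_le_of_ne h1 hne
        exact absurd hsl (h4 a le_rfl this)
    · simp only [if_neg hsl]
      rw [ih (a + 1) L j (by omega)]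
      constructor
      · rintro ⟨h1, h2, h3, h4⟩
        refine ⟨by omega, h2, h3, ?_⟩
        intro k hk1 hk2
        rcases eq_or_lt_of_le hk1 with h' | h'
        · subst h'; exact hsl
        · exact h4 k (by omega) hk2
      · rintro ⟨h1, h2, h3, h4⟩
        have haj : a ≠ j := by
          rintro rfl; exact hsl h3
        exact ⟨by omega, h2, h3, fun k hk1 hk2 => h4 k (by omega) hk2⟩

-- B's fold step, named for the proofs
def pvBStep (gen : List Int) (best : Option (Int × Int)) (seq : List Int) : Option (Int × Int) :=
  let n : Int := gen.length
  let m : Int := seq.length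
  if m = 0 then best
  else
    let limit : Int := match best with
      | none => n - m + 1
      | some p => min (n - m + 1) p.1
    match pvBScan gen seq m (PySem.List.pyRange 0 limit 1) with
    | some j => some (j, m)
    | none => best

-- the no-match-before facts needed repeatedly
theorem pvNoSliceOfNoMatch (gen s : List Int) (hs : s ≠ []) (j : Int) (hj0 : 0 ≤ j)
    (h : pvMatch gen j.toNat s = false) :
    PySem.List.slice gen (some j) (some (j + (s.length : Int))) ≠ s := by
  intro hsl
  have := (pvSlice_iff_match gen s j hj0 hs).mp hsl
  rw [h] at this
  exact absurd this (by simp)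

theorem pvBStep_spec (gen : List Int) (ts : List (List Int)) (s : List Int) :
    pvBStep gen (pvSpec gen ts) s = pvSpec gen (ts ++ [s]) := by
  by_cases hse : s = []
  · subst hse
    have hm : ∀ i, pvMatch gen i ([] : List Int) = false := by intro i; simp [pvMatch]
    have hpred : ∀ j < gen.length,
        (fun i => (ts ++ [([] : List Int)]).any (pvMatch gen i)) j = (fun i => ts.any (pvMatch gen i)) j := by
      intro j _; simp [List.any_append, hm]
    unfold pvBStep pvSpec
    rw [pvFirst_congr _ _ _ hpred]
    rcases hfi : pvFirst (fun i => ts.any (pvMatch gen i)) gen.length with _ | i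
    · simp
    · simp [List.find?_append, hm, List.find?]
  · have hs1 : 0 < s.length := by
      cases s
      · exact absurd rfl hse
      · simp
    have hmz : ¬ ((s.length : Int) = 0) := by omega
    rcases hft : pvFirst (fun i => ts.any (pvMatch gen i)) gen.length with _ | i0
    · -- no match in ts: pvSpec ts = none
      have hallP := (pvFirst_none_iff _ _).mp hft
      have hspec : pvSpec gen ts = none := by simp [pvSpec, hft]
      rcases hfs : pvFirst (fun i => pvMatch gen i s) gen.length with _ | j0
      · -- no match of s either
        have hallQ := (pvFirst_none_iff _ _).mp hfs
        have hscan : pvBScan gen s (s.length : Int)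
            (PySem.List.pyRange 0 ((gen.length : Int) - (s.length : Int) + 1) 1) = none := by
          rw [pvBScan_none_iff gen s _ (((gen.length : Int) - (s.length : Int) + 1) - 0).toNat 0 _ rfl]
          intro j h1 h2
          exact pvNoSliceOfNoMatch gen s hse j h1 (hallQ j.toNat (by omega))
        have hcomb : pvFirst (fun i => (ts ++ [s]).any (pvMatch gen i)) gen.length = none := by
          refine (pvFirst_none_iff _ _).mpr ?_
          intro j hj
          simp [List.any_append, hallP j hj, hallQ j hj]
        rw [hspec]
        unfold pvBStep pvSpec
        rw [hcomb]
        simp only [if_neg hmz, hscan]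
      · -- first match of s at j0
        obtain ⟨hj0lt, hQ, hQmin⟩ := (pvFirst_some_iff _ _ j0).mp hfs
        have hbnd := (pvMatch_bound hQ).1
        have hscan : pvBScan gen s (s.length : Int)
            (PySem.List.pyRange 0 ((gen.length : Int) - (s.length : Int) + 1) 1) = some (j0 : Int) := by
          rw [pvBScan_some_iff gen s _ (((gen.length : Int) - (s.length : Int) + 1) - 0).toNat 0 _ (j0 : Int) rfl]
          refine ⟨by positivity, by push_cast; omega, ?_, ?_⟩
          · exact (pvSlice_iff_match gen s (j0 : Int) (by positivity) hse).mpr (by simpa using hQ)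
          · intro k h1 h2
            exact pvNoSliceOfNoMatch gen s hse k h1 (hQmin k.toNat (by omega))
        have hcomb : pvFirst (fun i => (ts ++ [s]).any (pvMatch gen i)) gen.length = some j0 := by
          refine (pvFirst_some_iff _ _ j0).mpr ⟨hj0lt, ?_, ?_⟩
          · simp [List.any_append, hQ]
          · intro k hk
            simp [List.any_append, hallP k (by omega), hQmin k hk]
        have hfind : (ts ++ [s]).find? (pvMatch gen j0) = some s := by
          rw [List.find?_append]
          have hnone : ts.find? (pvMatch gen j0) = none := by
            rw [List.find?_eq_none]
            intro x hx
            have := hallP j0 hj0lt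
            rw [List.any_eq_false] at this
            simpa using this x hx
          simp [hnone, List.find?, hQ]
        rw [hspec]
        unfold pvBStep pvSpec
        rw [hcomb]
        simp only [if_neg hmz, hscan, hfind]
    · -- first ts-match at i0
      obtain ⟨hi0lt, hP, hPmin⟩ := (pvFirst_some_iff _ _ i0).mp hft
      obtain ⟨t, hfindt⟩ : ∃ t, ts.find? (pvMatch gen i0) = some t := by
        have hsome : (ts.find? (pvMatch gen i0)).isSome := by
          rw [List.any_eq_true] at hP
          obtain ⟨x, hx, hpx⟩ := hP
          exact List.find?_isSome.mpr ⟨x, hx, hpx⟩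
        exact ⟨(ts.find? (pvMatch gen i0)).get hsome, Option.eq_some_of_isSome hsome⟩
      have hspec : pvSpec gen ts = some ((i0 : Int), (t.length : Int)) := by
        simp [pvSpec, hft, hfindt]
      by_cases hbefore : ∃ j0, pvFirst (fun i => pvMatch gen i s) gen.length = some j0 ∧ j0 < i0
      · obtain ⟨j0, hfs, hj0i0⟩ := hbefore
        obtain ⟨hj0lt, hQ, hQmin⟩ := (pvFirst_some_iff _ _ j0).mp hfs
        have hbnd := (pvMatch_bound hQ).1
        have hscan : pvBScan gen s (s.length : Int)
            (PySem.List.pyRange 0 (min ((gen.length : Int) - (s.length : Int) + 1) (i0 : Int)) 1) = some (j0 : Int) := by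
          rw [pvBScan_some_iff gen s _ ((min ((gen.length : Int) - (s.length : Int) + 1) (i0 : Int)) - 0).toNat 0 _ (j0 : Int) rfl]
          refine ⟨by positivity, ?_, ?_, ?_⟩
          · have : (j0 : Int) < (i0 : Int) := by exact_mod_cast hj0i0
            have h2 : (j0 : Int) < (gen.length : Int) - (s.length : Int) + 1 := by push_cast; omega
            omega
          · exact (pvSlice_iff_match gen s (j0 : Int) (by positivity) hse).mpr (by simpa using hQ)
          · intro k h1 h2
            exact pvNoSliceOfNoMatch gen s hse k h1 (hQmin k.toNat (by omega))
        have hcomb : pvFirst (fun i => (ts ++ [s]).any (pvMatch gen i)) gen.length = some j0 := by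
          refine (pvFirst_some_iff _ _ j0).mpr ⟨hj0lt, ?_, ?_⟩
          · simp [List.any_append, hQ]
          · intro k hk
            simp [List.any_append, hPmin k (by omega), hQmin k hk]
        have hfind : (ts ++ [s]).find? (pvMatch gen j0) = some s := by
          rw [List.find?_append]
          have hnone : ts.find? (pvMatch gen j0) = none := by
            rw [List.find?_eq_none]
            intro x hx
            have := hPmin j0 hj0i0
            rw [List.any_eq_false] at this
            simpa using this x hx
          simp [hnone, List.find?, hQ]
        rw [hspec]
        unfold pvBStep pvSpec
        rw [hcomb]
        simp only [if_neg hmz, hscan, hfind]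
      · -- s has no match before i0: best unchanged
        have hQbefore : ∀ k < i0, pvMatch gen k s = false := by
          intro k hk
          rcases hfs : pvFirst (fun i => pvMatch gen i s) gen.length with _ | j0
          · exact (pvFirst_none_iff _ _).mp hfs k (by omega)
          · obtain ⟨_, _, hQmin⟩ := (pvFirst_some_iff _ _ j0).mp hfs
            have hj0 : ¬ j0 < i0 := fun h => hbefore ⟨j0, hfs, h⟩
            exact hQmin k (by omega)
        have hscan : pvBScan gen s (s.length : Int)
            (PySem.List.pyRange 0 (min ((gen.length : Int) - (s.length : Int) + 1) (i0 : Int)) 1) = none := by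
          rw [pvBScan_none_iff gen s _ ((min ((gen.length : Int) - (s.length : Int) + 1) (i0 : Int)) - 0).toNat 0 _ rfl]
          intro j h1 h2
          have hji0 : j.toNat < i0 := by omega
          exact pvNoSliceOfNoMatch gen s hse j h1 (hQbefore j.toNat hji0)
        have hcomb : pvFirst (fun i => (ts ++ [s]).any (pvMatch gen i)) gen.length = some i0 := by
          refine (pvFirst_some_iff _ _ i0).mpr ⟨hi0lt, ?_, ?_⟩
          · simp [List.any_append, hP]
          · intro k hk
            simp [List.any_append, hPmin k hk, hQbefore k hk]
        have hfind : (ts ++ [s]).find? (pvMatch gen i0) = some t := by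
          rw [List.find?_append, hfindt]
          rfl
        rw [hspec]
        unfold pvBStep pvSpec
        rw [hcomb]
        simp only [if_neg hmz, hscan, hfind]

theorem pvBFold_spec (gen : List Int) (seqs : List (List Int)) :
    seqs.foldl (pvBStep gen) none = pvSpec gen seqs := by
  induction seqs using List.reverseRecOn with
  | nil =>
    have h0 : pvFirst (fun _ : Nat => false) gen.length = none :=
      (pvFirst_none_iff _ _).mpr (fun j hj => rfl)
    simp [pvSpec, h0]
  | append_singleton ts s ih =>
    rw [List.foldl_append, List.foldl_cons, List.foldl_nil, ih]
    exact pvBStep_spec gen ts s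

theorem findB_eq_spec (gen : List Int) (seqs : List (List Int)) :
    find_first_stop_alt gen seqs = pvSpec gen seqs := by
  have hstep : find_first_stop_alt gen seqs = seqs.foldl (pvBStep gen) none := by
    unfold find_first_stop_alt pvBStep
    rfl
  rw [hstep, pvBFold_spec]

-- ===== VERDICT (by name: the statement is the Claim_ definition above) =====
theorem find_first_stop_spec : Claim_equal_find_first_stop := by
  intro gen seqs _
  unfold Spec_find_first_stop
  rw [findA_eq_spec, findB_eq_spec]
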